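-- pv_equiv track=rewrite | github.com/GDSCAlgorithm/ChoiSangwon | programmers/최고의 집합.py | solution
-- ===== SOURCE A (Python) =====
-- def solution(n, s):
--     answer = []
--     if(s//n==0):
--         return [-1]
--     else:
--         for i in range(n):
--             answer.append(s//n)
--         for i in range(s%n):
--             answer[-1-i]+=1
--         return answer
-- ===== SOURCE B (Python) =====
-- def solution(n, s):
--     if s // n == 0:
--         return [-1]
--     return [(s + i) // n for i in range(n)]
-- ===== Notes on version B (the rewrite author's own statement) =====
-- stated objective: simpler
-- what changed: Replaces the fill loop plus the in-place increment pass over the last s%n entries by a single per-element closed form: element i is (s+i)//n, computed independently with no mutation and no remainder bookkeeping.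
import Mathlib
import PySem

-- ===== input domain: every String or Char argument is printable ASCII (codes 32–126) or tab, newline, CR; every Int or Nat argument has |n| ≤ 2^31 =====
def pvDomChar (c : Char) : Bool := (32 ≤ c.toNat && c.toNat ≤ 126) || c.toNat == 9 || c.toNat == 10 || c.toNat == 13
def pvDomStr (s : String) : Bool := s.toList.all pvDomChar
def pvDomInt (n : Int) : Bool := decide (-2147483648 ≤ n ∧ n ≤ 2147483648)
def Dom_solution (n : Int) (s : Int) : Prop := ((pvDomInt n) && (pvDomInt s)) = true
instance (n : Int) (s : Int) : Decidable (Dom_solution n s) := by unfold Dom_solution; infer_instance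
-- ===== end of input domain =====

-- B drops A's fill-then-increment passes: each element i is computed independently
-- by the closed form (s+i)//n; objective: simpler.

-- ===== PORT A =====
def solution (n : Int) (s : Int) : List Int :=
  if PySem.Int.floordiv s n = 0 then [-1]
  else
    let answer := (PySem.List.pyRange 0 n 1).foldl
      (fun acc _ => acc ++ [PySem.Int.floordiv s n]) []
    (PySem.List.pyRange 0 (PySem.Int.mod s n) 1).foldl
      (fun acc i => PySem.List.pySetD acc (-1 - i) (PySem.List.pyGetD acc (-1 - i) 0 + 1))
      answer

-- ===== PORT B =====
def solution_alt (n : Int) (s : Int) : List Int :=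
  if PySem.Int.floordiv s n = 0 then [-1]
  else (PySem.List.pyRange 0 n 1).map (fun i => PySem.Int.floordiv (s + i) n)

-- ===== PRECONDITION & SPEC =====
-- A performs s // n, which raises ZeroDivisionError for n = 0; B raises there too.
def Pre_solution (n : Int) (s : Int) : Prop := n ≠ 0
instance (n : Int) (s : Int) : Decidable (Pre_solution n s) := by unfold Pre_solution; infer_instance
def pvWitness_solution : Int × Int := (3, 14)

def Spec_solution (n : Int) (s : Int) (out : List Int) : Prop := out = solution_alt n s
instance (n : Int) (s : Int) (out : List Int) : Decidable (Spec_solution n s out) := by unfold Spec_solution; infer_instance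

-- ===== CLAIM (what is proved, stated in full; the proofs are below) =====
def Claim_equal_solution : Prop := ∀ (n : Int) (s : Int), Dom_solution n s → Pre_solution n s → Spec_solution n s (solution n s)

-- ===== LEMMAS AND PROOFS =====

-- A's first loop appends one copy of q per range element.
lemma foldl_append_const (q : Int) (l : List Int) (init : List Int) :
    l.foldl (fun acc _ => acc ++ [q]) init = init ++ List.replicate l.length q := by
  induction l generalizing init with
  | nil => simp
  | cons a t ih => simp [List.foldl, ih, List.replicate_succ]

lemma fillLoop (n : Int) (q : Int) :
    (PySem.List.pyRange 0 n 1).foldl (fun acc _ => acc ++ [q]) [] = List.replicate n.toNat q := by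
  rw [foldl_append_const]
  simp [PySem.List.length_pyRange_one]

-- Python's negative index -1-k on a list of length > k resolves to position length-1-k.
lemma pySetD_neg (xs : List Int) (k : Nat) (v : Int) (hk : k < xs.length) :
    PySem.List.pySetD xs (-1 - (k : Int)) v = xs.set (xs.length - 1 - k) v := by
  simp [PySem.List.pySetD, PySem.List.pySet?, PySem.List.pyIdx?]
  rw [if_neg (by omega), if_pos (by omega)]
  simp only [Option.map_some, Option.getD_some]
  congr 1
  omega

lemma pyGetD_neg' (xs : List Int) (k : Nat) (hk : k < xs.length) :
    PySem.List.pyGetD xs (-1 - (k : Int)) 0 = xs.getD (xs.length - 1 - k) 0 := by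
  simp [PySem.List.pyGetD, PySem.List.pyGet?, PySem.List.pyIdx?]
  rw [if_neg (by omega), if_pos (by omega)]
  simp only [Option.bind_some]
  have h2 : xs.length - (k + 1) = xs.length - 1 - k := by omega
  rw [h2]

-- A's second loop turns the last k copies of q into q+1.
lemma incLoop (len : Nat) (q : Int) (k : Nat) (hk : k ≤ len) :
    (PySem.List.pyRange 0 (k : Int) 1).foldl
      (fun acc i => PySem.List.pySetD acc (-1 - i) (PySem.List.pyGetD acc (-1 - i) 0 + 1))
      (List.replicate len q)
    = List.replicate (len - k) q ++ List.replicate k (q + 1) := by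
  induction k with
  | zero => simp
  | succ m ih =>
    have hcast : ((m + 1 : Nat) : Int) = (m : Int) + 1 := by push_cast; ring
    rw [hcast, PySem.List.pyRange_one_succ_right (by positivity), List.foldl_append,
      ih (by omega)]
    simp only [List.foldl_cons, List.foldl_nil]
    set xs := List.replicate (len - m) q ++ List.replicate m (q + 1) with hxs
    have hlen : xs.length = len := by simp [hxs]; omega
    rw [pyGetD_neg' xs m (by omega), pySetD_neg xs m _ (by omega)]
    have hget : xs.getD (xs.length - 1 - m) 0 = q := by
      rw [hlen, hxs, List.getD_eq_getElem?_getD,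
        List.getElem?_append_left (by simp; omega)]
      rw [List.getElem?_replicate]
      rw [if_pos (by omega)]
      rfl
    rw [hget, hlen]
    have ha : len - m = (len - m - 1) + 1 := by omega
    rw [hxs, ha, List.replicate_succ', List.append_assoc,
      List.set_append_right _ _ (by simp; omega)]
    have hidx : len - 1 - m - (List.replicate (len - m - 1) q).length = 0 := by
      simp; omega
    rw [hidx]
    have hb : len - (m + 1) = len - m - 1 := by omega
    rw [hb]
    simp [List.replicate_succ]

-- B's per-element closed form agrees with the replicate split, elementwise.
lemma mapDiv (n s : Int) (hpos : 0 < n) :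
    (PySem.List.pyRange 0 n 1).map (fun i => PySem.Int.floordiv (s + i) n)
    = List.replicate (n - PySem.Int.mod s n).toNat (PySem.Int.floordiv s n)
      ++ List.replicate (PySem.Int.mod s n).toNat (PySem.Int.floordiv s n + 1) := by
  have hr0 : 0 ≤ PySem.Int.mod s n := PySem.Int.mod_nonneg (a := s) hpos
  have hr1 : PySem.Int.mod s n < n := PySem.Int.mod_lt (a := s) hpos
  have hsum := PySem.Int.floordiv_mul_add_mod s n
  set q := PySem.Int.floordiv s n with hq
  set r := PySem.Int.mod s n with hr
  apply List.ext_getElem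
  · simp [PySem.List.length_pyRange_one]; omega
  · intro k hk1 hk2
    simp only [List.getElem_map, PySem.List.getElem_pyRange_one, zero_add]
    have hkn : k < n.toNat := by
      simpa [PySem.List.length_pyRange_one] using hk1
    by_cases hcase : k < (n - r).toNat
    · rw [List.getElem_append_left (by simpa using hcase), List.getElem_replicate]
      rw [PySem.Int.floordiv_eq_iff_of_pos (hb := hpos)]
      constructor
      · have : q * n + r = s := hsum
        omega
      · have h1 : (q + 1) * n = q * n + n := by ring
        rw [h1]
        omega
    · rw [List.getElem_append_right (by simpa using hcase), List.getElem_replicate]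
      rw [PySem.Int.floordiv_eq_iff_of_pos (hb := hpos)]
      constructor
      · have h1 : (q + 1) * n = q * n + n := by ring
        rw [h1]
        omega
      · have h1 : (q + 1 + 1) * n = q * n + n + n := by ring
        rw [h1]
        omega

-- ===== VERDICT (by name: the statement is the Claim_ definition above) =====
theorem solution_spec : Claim_equal_solution := by
  intro n s _ hn
  unfold Spec_solution solution solution_alt
  by_cases hq : PySem.Int.floordiv s n = 0
  · simp [hq]
  · simp only [hq, if_false]
    set q := PySem.Int.floordiv s n with hqdef
    set r := PySem.Int.mod s n with hrdef
    rcases lt_or_gt_of_ne hn with hneg | hpos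
    · -- n < 0: A's loops are empty and B's range is empty
      rw [PySem.List.pyRange_one_eq_nil (le_of_lt hneg)]
      have hb := PySem.Int.mod_neg_bounds (a := s) (b := n) hneg
      rw [PySem.List.pyRange_one_eq_nil (by omega)]
      simp
    · -- n > 0
      have hr0 : 0 ≤ r := PySem.Int.mod_nonneg (a := s) hpos
      have hr1 : r < n := PySem.Int.mod_lt (a := s) hpos
      rw [fillLoop, mapDiv n s hpos]
      have hrc : r = ((r.toNat : Nat) : Int) := (Int.toNat_of_nonneg hr0).symm
      conv_lhs => rw [hrc]
      rw [incLoop n.toNat q r.toNat (by omega)]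
      congr 1
      · congr 1
        omega
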